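-- pv_equiv track=rewrite | github.com/tonyxqy/Listen-to-Picture---Intelligent-Speech-Assistant-Based-on-Automatic-Digest | afterend/renshi/Textling/duplicate.py | calculate_depth_score
-- ===== SOURCE A (Python) =====
-- def calculate_depth_score(scores):#ok
--     '''
--     计算每个相似度相对于其附近的相似度之间的差距,取宽度为min(max(len(score)//10,2),5),
--     分别得到左右两边窗口中的最大值,则此分隔的差异取两最大值的和减去该值.
--     '''
--     depth_score=[0]*len(scores)
--     clip=min(max(len(scores)//10,2),5)
--     index=clip
--     for gapscore in scores[clip:-clip]:
--         lpeak=gapscore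
--         for score in scores[index::-1]:
--             if score>=lpeak:
--                 lpeak=score
--             else:
--                 break
--         rpeak=gapscore
--         for score in scores[index:]:
--             if score>=rpeak:
--                 rpeak=score
--             else:
--                 break
--         depth_score[index]=lpeak+rpeak-2*gapscore
--         index+=1
--     return depth_score
-- ===== SOURCE B (Python) =====
-- def _run_peaks(scores):
--     # peaks[i] = peak of the maximal nondecreasing-to-the-left run ending at i
--     peaks = []
--     for i, s in enumerate(scores):
--         peak = s if i == 0 or scores[i - 1] < s else peaks[-1]
--         peaks.append(peak)
--     return peaks
--
--
-- def calculate_depth_score(scores):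
--     n = len(scores)
--     clip = min(max(n // 10, 2), 5)
--     lpeaks = _run_peaks(scores)
--     rpeaks = _run_peaks(scores[::-1])[::-1]
--     return [lpeaks[i] + rpeaks[i] - 2 * scores[i] if clip <= i < n - clip else 0
--             for i in range(n)]
-- ===== Notes on version B (the rewrite author's own statement) =====
-- stated objective: faster
-- what changed: A rescans left and right from every gap (O(n^2) worst case); B precomputes all run peaks in two linear passes with the recurrence peak[i] = scores[i] if scores[i-1] < scores[i] else peak[i-1] (right side = same pass on the reversed list) and then builds the result in one comprehension.
import Mathlib
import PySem

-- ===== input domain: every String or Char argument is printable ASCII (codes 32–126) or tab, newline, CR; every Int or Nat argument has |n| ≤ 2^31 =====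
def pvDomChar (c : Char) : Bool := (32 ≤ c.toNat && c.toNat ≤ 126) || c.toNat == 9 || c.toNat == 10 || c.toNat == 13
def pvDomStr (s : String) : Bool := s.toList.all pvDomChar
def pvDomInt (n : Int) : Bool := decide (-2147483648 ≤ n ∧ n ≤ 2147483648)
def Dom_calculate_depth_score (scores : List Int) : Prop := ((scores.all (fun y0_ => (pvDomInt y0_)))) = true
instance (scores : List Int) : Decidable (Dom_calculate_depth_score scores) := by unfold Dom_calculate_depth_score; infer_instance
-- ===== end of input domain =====

-- B replaces A's per-gap quadratic left/right climbing scans by two linear passes that compute every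
-- run peak once with the recurrence peak[i] = scores[i] if scores[i-1] < scores[i] else peak[i-1].

-- ===== PORT A =====
-- the inner 'for score in …: if score >= peak: peak = score; else: break' loop of A
def pvClimb (p : Int) : List Int → Int
  | [] => p
  | s :: rest => if s ≥ p then pvClimb s rest else p

def calculate_depth_score (scores : List Int) : List Int :=
  let depth0 : List Int := List.replicate scores.length 0          -- depth_score = [0]*len(scores)
  let clip : Int := min (max (PySem.Int.floordiv (scores.length : Int) 10) 2) 5
  -- for gapscore in scores[clip:-clip]: … depth_score[index] = lpeak+rpeak-2*gapscore; index += 1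
  -- (depth_score[index] = v is List.set at index.toNat: index is always a valid non-negative index here)
  let st := (PySem.List.slice scores (some clip) (some (-clip))).foldl
    (fun (st : List Int × Int) gapscore =>
      let lpeak := pvClimb gapscore ((PySem.List.slice? scores (some st.2) none (-1)).getD [])  -- scores[index::-1]
      let rpeak := pvClimb gapscore (PySem.List.slice scores (some st.2) none)                  -- scores[index:]
      (st.1.set st.2.toNat (lpeak + rpeak - 2 * gapscore), st.2 + 1))
    (depth0, clip)
  st.1

-- ===== PORT B =====
-- _run_peaks: peaks.append(s if i == 0 or scores[i-1] < s else peaks[-1])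
def pvRunPeaksGo (prev p : Int) : List Int → List Int
  | [] => []
  | s :: rest =>
      let q := if prev < s then s else p
      q :: pvRunPeaksGo s q rest

def pvRunPeaks : List Int → List Int
  | [] => []
  | s :: rest => s :: pvRunPeaksGo s s rest

def calculate_depth_score_alt (scores : List Int) : List Int :=
  let n : Int := scores.length
  let clip : Int := min (max (PySem.Int.floordiv n 10) 2) 5
  let lpeaks := pvRunPeaks scores
  let rpeaks := (pvRunPeaks scores.reverse).reverse                -- _run_peaks(scores[::-1])[::-1]
  (List.range scores.length).map (fun (i : Nat) =>
    if clip ≤ (i : Int) ∧ (i : Int) < n - clip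
    then lpeaks.getD i 0 + rpeaks.getD i 0 - 2 * scores.getD i 0
    else 0)

-- ===== PRECONDITION & SPEC =====
def Spec_calculate_depth_score (scores : List Int) (out : List Int) : Prop := out = calculate_depth_score_alt scores
instance (scores : List Int) (out : List Int) : Decidable (Spec_calculate_depth_score scores out) := by unfold Spec_calculate_depth_score; infer_instance

-- ===== CLAIM (what is proved, stated in full; the proofs are below) =====
def Claim_equal_calculate_depth_score : Prop := ∀ (scores : List Int), Dom_calculate_depth_score scores → Spec_calculate_depth_score scores (calculate_depth_score scores)

-- ===== LEMMAS AND PROOFS =====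

-- common spec: peak of the maximal nondecreasing-to-the-left run ending at i
def pvClimbL (scores : List Int) : Nat → Int
  | 0 => scores.getD 0 0
  | i + 1 => if scores.getD i 0 ≥ scores.getD (i + 1) 0 then pvClimbL scores i else scores.getD (i + 1) 0

theorem pv_back_aux (i : Nat) : ∀ (xs : List Int), i < xs.length →
    List.filterMap (fun k => xs[i - k]?) (List.range (i + 1)) = (xs.take (i + 1)).reverse := by
  induction i with
  | zero =>
      intro xs h
      cases xs with
      | nil => simp at h
      | cons x t => simp [List.range_succ]
  | succ i ih =>
      intro xs h
      cases xs with
      | nil => simp at h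
      | cons x t =>
          rw [List.range_succ, List.filterMap_append]
          have h1 : List.filterMap (fun k => (x :: t)[i + 1 - k]?) (List.range (i + 1))
              = List.filterMap (fun k => t[i - k]?) (List.range (i + 1)) := by
            apply List.filterMap_congr
            intro k hk
            rw [List.mem_range] at hk
            have : i + 1 - k = (i - k) + 1 := by omega
            rw [this]
            rfl
          rw [h1, ih t (by simpa using h)]
          simp [List.take_succ_cons]

-- scores[i::-1] evaluates to (scores.take (i+1)).reverse
theorem pv_slice_back (xs : List Int) (i : Nat) (h : i < xs.length) :
    (PySem.List.slice? xs (some (i : Int)) none (-1)).getD [] = (xs.take (i + 1)).reverse := by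
  have hidx : PySem.List.sliceIndices xs.length (some (i : Int)) none (-1) = ((i : Int), -1, -1) := by
    simp only [PySem.List.sliceIndices]
    have h1 : ¬ ((i:Int) < 0) := by omega
    have h2 : min (i:Int) ((xs.length : Int) - 1) = (i : Int) := by omega
    simp [h1, h2]
  rw [PySem.List.slice?]
  simp only [if_neg (by norm_num : ¬ ((-1 : Int) = 0)), hidx]
  have hcount : (if 0 < (-1:Int) then if (i:Int) < -1 then (((-1:Int) - i + -1 - 1) / -1).toNat else 0
      else if (-1:Int) < (i:Int) then (((i:Int) - (-1) + -(-1) - 1) / -(-1)).toNat else 0) = i + 1 := by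
    have h4 : (-1:Int) < (i:Int) := by omega
    simp [h4]
  rw [hcount, Option.getD_some]
  have hfc : List.filterMap (fun k : Nat => xs[((i:Int) + -1 * k).toNat]?) (List.range (i + 1))
      = List.filterMap (fun k : Nat => xs[i - k]?) (List.range (i + 1)) := by
    apply List.filterMap_congr
    intro k hk
    rw [List.mem_range] at hk
    have : ((i:Int) + -1 * k).toNat = i - k := by omega
    rw [this]
  rw [hfc, pv_back_aux i xs h]

-- A's left climb satisfies the pvClimbL recurrence
theorem pv_climb_take (scores : List Int) (i : Nat) (h : i < scores.length) :
    pvClimb (scores.getD i 0) ((scores.take i).reverse) = pvClimbL scores i := by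
  induction i with
  | zero => simp [pvClimb, pvClimbL]
  | succ i ih =>
      have hi : i < scores.length := by omega
      have hg : scores.getD i 0 = scores[i] := by
        rw [List.getD_eq_getElem scores 0 hi]
      rw [List.take_succ_eq_append_getElem hi, List.reverse_append]
      simp only [List.reverse_cons, List.reverse_nil, List.nil_append, List.singleton_append]
      rw [pvClimb, pvClimbL, ← hg]
      split_ifs with hc
      · exact ih hi
      · rfl

-- A's right climb is the left climb of the reversed list
theorem pv_climb_right (scores : List Int) (k : Nat) (h : k < scores.length) :
    pvClimb (scores.getD k 0) (scores.drop (k + 1))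
      = pvClimbL scores.reverse (scores.length - 1 - k) := by
  have hlen : scores.length - 1 - k < scores.reverse.length := by simp; omega
  rw [← pv_climb_take scores.reverse (scores.length - 1 - k) hlen]
  congr 1
  · rw [List.getD_eq_getElem scores 0 h, List.getD_eq_getElem scores.reverse 0 hlen]
    rw [List.getElem_reverse]
    congr 1
    omega
  · rw [List.take_reverse, List.reverse_reverse]
    congr 1
    omega

theorem pvRunPeaksGo_length (prev p : Int) (l : List Int) :
    (pvRunPeaksGo prev p l).length = l.length := by
  induction l generalizing prev p with
  | nil => rfl
  | cons s rest ih => simp [pvRunPeaksGo, ih]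

theorem pvRunPeaks_length (l : List Int) : (pvRunPeaks l).length = l.length := by
  cases l with
  | nil => rfl
  | cons s rest => simp [pvRunPeaks, pvRunPeaksGo_length]

-- B's forward pass computes pvClimbL
theorem pvRunPeaksGo_spec (scores : List Int) :
    ∀ (rest : List Int) (k i : Nat), scores.drop (k + 1) = rest → k + 1 + i < scores.length →
    (pvRunPeaksGo (scores.getD k 0) (pvClimbL scores k) rest).getD i 0 = pvClimbL scores (k + 1 + i) := by
  intro rest
  induction rest with
  | nil =>
      intro k i hd hlen
      have : scores.length ≤ k + 1 := by
        have := congrArg List.length hd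
        simp at this; omega
      omega
  | cons s t ih =>
      intro k i hd hlen
      have hk1 : k + 1 < scores.length := by omega
      have hs : s = scores.getD (k + 1) 0 := by
        have := List.drop_eq_getElem_cons hk1
        rw [hd] at this
        rw [List.getD_eq_getElem scores 0 hk1]
        exact (List.cons.injEq _ _ _ _ ▸ this).1
      have ht : scores.drop (k + 2) = t := by
        have := List.drop_eq_getElem_cons hk1
        rw [hd] at this
        exact ((List.cons.injEq _ _ _ _ ▸ this).2).symm
      have hq : (if scores.getD k 0 < s then s else pvClimbL scores k) = pvClimbL scores (k + 1) := by
        rw [hs, pvClimbL]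
        split_ifs with h1 h2 h2 <;> first | rfl | omega
      rw [pvRunPeaksGo]
      simp only [hq]
      cases i with
      | zero => simp
      | succ j =>
          have : (pvClimbL scores (k+1) :: pvRunPeaksGo s (pvClimbL scores (k+1)) t).getD (j+1) 0
              = (pvRunPeaksGo s (pvClimbL scores (k+1)) t).getD j 0 := rfl
          rw [this, hs]
          have := ih (k+1) j ht (by omega)
          rw [this]
          congr 1
          omega

theorem pvRunPeaks_spec (scores : List Int) (i : Nat) (h : i < scores.length) :
    (pvRunPeaks scores).getD i 0 = pvClimbL scores i := by
  cases scores with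
  | nil => simp at h
  | cons s rest =>
      cases i with
      | zero => simp [pvRunPeaks, pvClimbL]
      | succ j =>
          have h0 : (s :: rest).getD 0 0 = s := rfl
          have hL0 : pvClimbL (s :: rest) 0 = s := rfl
          have : (pvRunPeaks (s :: rest)).getD (j+1) 0
              = (pvRunPeaksGo ((s :: rest).getD 0 0) (pvClimbL (s :: rest) 0) rest).getD j 0 := by
            rw [pvRunPeaks, h0, hL0]; rfl
          rw [this, pvRunPeaksGo_spec (s :: rest) rest 0 j (by simp) (by simp at h ⊢; omega)]
          congr 1; omega

-- the value A stores at index j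
def pvF (scores : List Int) (j : Nat) : Int :=
  pvClimb (scores.getD j 0) ((scores.take j).reverse)
    + pvClimb (scores.getD j 0) (scores.drop (j + 1))
    - 2 * scores.getD j 0

theorem pv_foldA_length (scores : List Int) :
    ∀ (t d : List Int) (idx : Int),
      ((t.foldl
        (fun (st : List Int × Int) gapscore =>
          let lpeak := pvClimb gapscore ((PySem.List.slice? scores (some st.2) none (-1)).getD [])
          let rpeak := pvClimb gapscore (PySem.List.slice scores (some st.2) none)
          (st.1.set st.2.toNat (lpeak + rpeak - 2 * gapscore), st.2 + 1))
        (d, idx)).1).length = d.length := by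
  intro t
  induction t with
  | nil => intro d idx; rfl
  | cons g t ih =>
      intro d idx
      rw [List.foldl_cons]
      simp only []
      rw [ih]
      exact List.length_set ..

-- A's fold, elementwise
theorem pv_foldA (scores : List Int) :
    ∀ (t d : List Int) (idx : Nat),
      (∀ j, j < t.length → t.getD j 0 = scores.getD (idx + j) 0) →
      (t ≠ [] → idx + t.length ≤ scores.length ∧ idx + t.length ≤ d.length) →
      ∀ k : Nat,
        ((t.foldl
          (fun (st : List Int × Int) gapscore =>
            let lpeak := pvClimb gapscore ((PySem.List.slice? scores (some st.2) none (-1)).getD [])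
            let rpeak := pvClimb gapscore (PySem.List.slice scores (some st.2) none)
            (st.1.set st.2.toNat (lpeak + rpeak - 2 * gapscore), st.2 + 1))
          (d, (idx : Int))).1).getD k 0
        = if idx ≤ k ∧ k < idx + t.length then pvF scores k else d.getD k 0 := by
  intro t
  induction t with
  | nil =>
      intro d idx hj hb k
      simp only [List.foldl_nil, List.length_nil]
      rw [if_neg (by omega)]
  | cons g t ih =>
      intro d idx hj hb k
      obtain ⟨hlen, hd⟩ := hb (by simp)
      have hidx : idx < scores.length := by simp only [List.length_cons] at hlen; omega
      have hg : g = scores.getD idx 0 := by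
        have := hj 0 (by simp)
        simpa using this
      have hgE : g = scores[idx] := by rw [hg]; exact List.getD_eq_getElem scores 0 hidx
      rw [List.foldl_cons]
      simp only [pv_slice_back scores idx hidx, PySem.List.slice_from_natCast]
      have htake : (scores.take (idx + 1)).reverse = scores[idx] :: (scores.take idx).reverse := by
        rw [List.take_succ_eq_append_getElem hidx, List.reverse_append]
        rfl
      have hdrop : scores.drop idx = scores[idx] :: scores.drop (idx + 1) :=
        List.drop_eq_getElem_cons hidx
      have hl : pvClimb g (scores.take (idx + 1)).reverse
          = pvClimb (scores.getD idx 0) ((scores.take idx).reverse) := by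
        rw [htake, pvClimb, if_pos (by rw [hgE] : scores[idx] ≥ g), ← hgE, hg]
      have hr : pvClimb g (scores.drop idx) = pvClimb (scores.getD idx 0) (scores.drop (idx + 1)) := by
        rw [hdrop, pvClimb, if_pos (by rw [hgE] : scores[idx] ≥ g), ← hgE, hg]
      have hcast : (idx : Int) + 1 = ((idx + 1 : Nat) : Int) := by push_cast; ring
      have htoNat : ((idx : Int)).toNat = idx := Int.toNat_natCast idx
      rw [hl, hr, htoNat, hcast, hg]
      have hset : (d.set idx (pvF scores idx)).length = d.length := List.length_set ..
      rw [show pvClimb (scores.getD idx 0) (scores.take idx).reverse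
            + pvClimb (scores.getD idx 0) (scores.drop (idx + 1))
            - 2 * scores.getD idx 0 = pvF scores idx from rfl]
      rw [ih (d.set idx (pvF scores idx)) (idx + 1)
        (by intro j hjlt
            have := hj (j + 1) (by simp only [List.length_cons]; omega)
            rw [show idx + 1 + j = idx + (j + 1) by omega]
            simpa using this)
        (by intro _
            constructor
            · simp only [List.length_cons] at hlen; omega
            · rw [hset]; simp only [List.length_cons] at hd; omega)]
      by_cases hk1 : idx + 1 ≤ k ∧ k < idx + 1 + t.length
      · rw [if_pos hk1, if_pos (by simp only [List.length_cons]; omega)]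
      · rw [if_neg hk1]
        by_cases hk2 : k = idx
        · subst hk2
          rw [if_pos (by simp only [List.length_cons]; omega)]
          have : (d.set k (pvF scores k))[k]? = some (pvF scores k) := by
            rw [List.getElem?_set_self (by simp only [List.length_cons] at hd; omega)]
          simp [List.getD, this]
        · rw [if_neg (by simp only [List.length_cons]; omega)]
          have : (d.set idx (pvF scores idx))[k]? = d[k]? :=
            List.getElem?_set_ne (by omega)
          simp [List.getD, this]

-- A's body slice scores[clip:-clip]
theorem pv_body_slice (xs : List Int) (c : Nat) (hc : 0 < c) :
    PySem.List.slice xs (some (c : Int)) (some (-(c : Int))) = (xs.take (xs.length - c)).drop c := by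
  simp only [PySem.List.slice, PySem.List.clampIdx]
  have h1 : ¬ ((c : Int) < 0) := by omega
  simp only [h1, if_false]
  by_cases h2 : (xs.length : Int) + -(c : Int) < 0
  · simp only [h2, reduceIte, if_pos (by omega : (-(c:Int)) < 0)]
    have : xs.length - c = 0 := by omega
    rw [this]
    simp
  · simp only [if_pos (by omega : (-(c:Int)) < 0), h2, if_false]
    have ha : min (c : Int).toNat xs.length = min c xs.length := by simp
    have hb : ((xs.length : Int) + -(c : Int)).toNat = xs.length - c := by omega
    rw [ha, hb, List.drop_take]
    rcases Nat.le_total c xs.length with h | h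
    · rw [Nat.min_eq_left h]
    · have h0 : xs.length - c = 0 := by omega
      rw [h0]
      simp

theorem pv_main (scores : List Int) : calculate_depth_score scores = calculate_depth_score_alt scores := by
  have hclip : (min (max (PySem.Int.floordiv (scores.length : Int) 10) 2) 5 : Int)
      = ((min (max (scores.length / 10) 2) 5 : Nat) : Int) := by
    have h10 : PySem.Int.floordiv (scores.length : Int) 10 = ((scores.length / 10 : Nat) : Int) := by
      exact_mod_cast PySem.Int.floordiv_natCast scores.length 10
    rw [h10]
    push_cast
    rfl
  set n := scores.length with hn
  set c : Nat := min (max (n / 10) 2) 5 with hcdef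
  have hc2 : 2 ≤ c ∧ c ≤ 5 := by omega
  unfold calculate_depth_score calculate_depth_score_alt
  simp only [← hn, hclip]
  rw [pv_body_slice scores c (by omega)]
  set body := (scores.take (n - c)).drop c with hbody
  have hblen : body.length = (n - c) - c := by simp [hbody, ← hn]
  apply List.ext_getElem
  · rw [pv_foldA_length]
    simp
  · intro k hk1 hk2
    have hkn : k < n := by rw [pv_foldA_length] at hk1; simp only [List.length_replicate] at hk1; omega
    have hAgetD := pv_foldA scores body (List.replicate n 0) c
      (by intro j hj
          rw [hblen] at hj
          rw [hbody]
          rw [List.getD, List.getD, List.getElem?_drop, List.getElem?_take]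
          rw [if_pos (by omega)])
      (by intro hne
          have hpos : 0 < body.length := List.length_pos_iff.mpr hne
          rw [hblen] at hpos
          rw [hblen]
          constructor
          · rw [← hn]; omega
          · simp only [List.length_replicate]; omega)
      k
    rw [← List.getD_eq_getElem _ 0 hk1, hAgetD]
    rw [List.getElem_map, List.getElem_range]
    rw [hblen]
    by_cases hcond : c ≤ k ∧ k < c + ((n - c) - c)
    · rw [if_pos hcond, if_pos (by omega)]
      rw [pvF]
      rw [pv_climb_take scores k hkn, pv_climb_right scores k hkn]
      have hl : (pvRunPeaks scores).getD k 0 = pvClimbL scores k := pvRunPeaks_spec scores k hkn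
      have hrlen : (pvRunPeaks scores.reverse).length = n := by rw [pvRunPeaks_length]; simp [← hn]
      have hr : ((pvRunPeaks scores.reverse).reverse).getD k 0 = pvClimbL scores.reverse (n - 1 - k) := by
        have hk' : k < (pvRunPeaks scores.reverse).reverse.length := by
          rw [List.length_reverse, hrlen]; omega
        rw [List.getD_eq_getElem _ 0 hk', List.getElem_reverse]
        have hlt : (pvRunPeaks scores.reverse).length - 1 - k < (pvRunPeaks scores.reverse).length := by
          rw [hrlen]; omega
        rw [← List.getD_eq_getElem _ 0 hlt]
        have hidx2 : (pvRunPeaks scores.reverse).length - 1 - k = n - 1 - k := by rw [hrlen]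
        rw [hidx2]
        exact pvRunPeaks_spec scores.reverse (n - 1 - k) (by rw [List.length_reverse, ← hn]; omega)
      rw [hl, hr, ← hn]
    · rw [if_neg hcond, if_neg (by omega)]
      simp

-- ===== VERDICT (by name: the statement is the Claim_ definition above) =====
theorem calculate_depth_score_spec : Claim_equal_calculate_depth_score := by
  intro scores _
  unfold Spec_calculate_depth_score
  exact pv_main scores
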